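-- pv_equiv track=rewrite | github.com/malaonda222/Python | Esercizi/RECUPERO/Funzioni_For_While_If_Elif_Else/es_2copia.py | moltiplica_numeri
-- ===== SOURCE A (Python) =====
-- def moltiplica_numeri(lista: list[int]) -> int:
--     numero_soglia: int = 30
--     risultato_moltiplicazione = 1
--     for element in lista:
--         if not isinstance(element, int):
--             raise ValueError("I numeri della lista devono essere tutti interi.")
--         else:
--             if element < numero_soglia:
--                 risultato_moltiplicazione *= element
--             else:
--                 continue
--
--     return risultato_moltiplicazione
-- ===== SOURCE B (Python) =====
-- def moltiplica_numeri(lista: list[int]) -> int: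
--     # Validate first, then compute the product by balanced divide and conquer on index ranges.
--     for element in lista:
--         if not isinstance(element, int):
--             raise ValueError("I numeri della lista devono essere tutti interi.")
--
--     def prodotto(lo: int, hi: int) -> int:
--         if hi <= lo:
--             return 1
--         if hi == lo + 1:
--             e = lista[lo]
--             return e if e < 30 else 1
--         mid = (lo + hi) // 2
--         return prodotto(lo, mid) * prodotto(mid, hi)
--
--     return prodotto(0, len(lista))
-- ===== Notes on version B (the rewrite author's own statement) =====
-- stated objective: alternative
-- what changed: Replaced A's fused left-to-right validate-and-multiply accumulator loop with a validation pass followed by a balanced divide-and-conquer product over index ranges (correct because integer multiplication is associative).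
import Mathlib
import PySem

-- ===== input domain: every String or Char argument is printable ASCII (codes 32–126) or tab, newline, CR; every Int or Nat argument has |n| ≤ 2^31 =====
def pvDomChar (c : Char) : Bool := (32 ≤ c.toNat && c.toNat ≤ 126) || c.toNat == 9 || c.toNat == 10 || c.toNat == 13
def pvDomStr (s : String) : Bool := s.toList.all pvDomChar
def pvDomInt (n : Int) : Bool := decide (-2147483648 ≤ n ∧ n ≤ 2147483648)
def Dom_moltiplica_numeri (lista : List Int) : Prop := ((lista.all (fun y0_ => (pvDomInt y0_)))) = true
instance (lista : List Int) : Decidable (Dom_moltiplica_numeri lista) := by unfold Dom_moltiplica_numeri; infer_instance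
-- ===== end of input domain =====

-- B replaces A's fused accumulator loop with a validation pass plus a balanced divide-and-conquer product over index ranges (alternative algorithm, same cost).


-- ===== PORT A =====
-- Port of A: fused loop with accumulator; the isinstance check always passes for List Int inputs.
def moltiplica_numeri (lista : List Int) : Int :=
  lista.foldl (fun risultato element =>
    if element < 30 then risultato * element else risultato) 1

-- ===== PORT B =====
-- Port of B's helper prodotto: balanced divide and conquer on the index range [lo, hi).
def prodottoRange (lista : List Int) (lo hi : Nat) : Int :=
  if _h : hi ≤ lo then 1
  else if _h2 : hi = lo + 1 then
    match lista[lo]? with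
    | some e => if e < 30 then e else 1
    | none => 1  -- unreachable when hi ≤ lista.length
  else
    prodottoRange lista lo ((lo + hi) / 2) * prodottoRange lista ((lo + hi) / 2) hi
termination_by hi - lo
decreasing_by all_goals omega

-- Port of B: validation pass (vacuous over Int), then the divide-and-conquer product over [0, len).
def moltiplica_numeri_alt (lista : List Int) : Int :=
  prodottoRange lista 0 lista.length

-- ===== PRECONDITION & SPEC =====
def Spec_moltiplica_numeri (lista : List Int) (out : Int) : Prop := out = moltiplica_numeri_alt lista
instance (lista : List Int) (out : Int) : Decidable (Spec_moltiplica_numeri lista out) := by unfold Spec_moltiplica_numeri; infer_instance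

-- ===== CLAIM =====
def Claim_equal_moltiplica_numeri : Prop := ∀ (lista : List Int), Dom_moltiplica_numeri lista → Spec_moltiplica_numeri lista (moltiplica_numeri lista)

-- ===== LEMMAS AND PROOFS =====
-- The filtered product of a segment, the common characterisation of both ports.
def prodF (l : List Int) : Int := (l.filter (fun e => e < 30)).prod

theorem prodF_append (a b : List Int) : prodF (a ++ b) = prodF a * prodF b := by
  simp [prodF, List.filter_append]

theorem fold_eq_prodF (lista : List Int) (acc : Int) :
    lista.foldl (fun r e => if e < 30 then r * e else r) acc = acc * prodF lista := by
  induction lista generalizing acc with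
  | nil => simp [prodF]
  | cons x xs ih =>
    simp only [List.foldl_cons, prodF, List.filter_cons]
    by_cases h : x < 30 <;> simp [h, ih, prodF, mul_assoc]

theorem prodottoRange_eq (lista : List Int) :
    ∀ n lo hi, hi - lo = n → hi ≤ lista.length →
      prodottoRange lista lo hi = prodF ((lista.drop lo).take (hi - lo)) := by
  intro n
  induction n using Nat.strong_induction_on with
  | _ n ih =>
    intro lo hi hn hlen
    rw [prodottoRange]
    by_cases h : hi ≤ lo
    · simp [h]
      have : hi - lo = 0 := by omega
      simp [this, prodF]
    · simp only [dif_neg h]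
      by_cases h2 : hi = lo + 1
      · simp only [dif_pos h2]
        have hlt : lo < lista.length := by omega
        have : lista[lo]? = some lista[lo] := List.getElem?_eq_getElem hlt
        rw [this]
        have h1 : hi - lo = 1 := by omega
        have hdrop : (lista.drop lo).take 1 = [lista[lo]] := by
          have : lista.drop lo = lista[lo] :: lista.drop (lo + 1) := by
            rw [List.drop_eq_getElem_cons hlt]
          rw [this]; rfl
        rw [h1, hdrop]
        by_cases he : lista[lo] < 30 <;> simp [prodF, he]
      · simp only [dif_neg h2]
        have hmid1 : ((lo + hi) / 2) - lo < n := by omega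
        have hmid2 : hi - ((lo + hi) / 2) < n := by omega
        have hle1 : (lo + hi) / 2 ≤ lista.length := by omega
        rw [ih _ hmid1 lo _ rfl hle1, ih _ hmid2 _ hi rfl hlen]
        have hsplit : (lista.drop lo).take (hi - lo)
            = (lista.drop lo).take ((lo + hi) / 2 - lo)
              ++ (lista.drop ((lo + hi) / 2)).take (hi - (lo + hi) / 2) := by
          have hadd : hi - lo = ((lo + hi) / 2 - lo) + (hi - (lo + hi) / 2) := by omega
          have hd : lista.drop ((lo + hi) / 2) = (lista.drop lo).drop ((lo + hi) / 2 - lo) := by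
            rw [List.drop_drop]
            congr 1
            omega
          rw [hadd, List.take_add, hd]
        rw [hsplit, prodF_append]

-- ===== VERDICT =====
theorem moltiplica_numeri_spec : Claim_equal_moltiplica_numeri := by
  intro lista _
  show moltiplica_numeri lista = moltiplica_numeri_alt lista
  have hb := prodottoRange_eq lista lista.length 0 lista.length rfl le_rfl
  simp at hb
  simpa [moltiplica_numeri, moltiplica_numeri_alt, hb] using fold_eq_prodF lista 1
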